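-- pv_equiv track=rewrite | github.com/Choe-Useong/upbit-quant-research | lib/universe.py | _date_groups
-- ===== SOURCE A (Python) =====
-- from collections import defaultdict
--
-- def _date_groups(rows: list[dict[str, str]]) -> list[list[int]]:
--     grouped: dict[str, list[int]] = defaultdict(list)
--     for idx, row in enumerate(rows):
--         grouped[row["date_utc"]].append(idx)
--     return [
--         sorted(indexes, key=lambda idx: rows[idx]["market"])
--         for _, indexes in sorted(grouped.items())
--     ]
-- ===== SOURCE B (Python) =====
-- def _date_groups(rows: list[dict[str, str]]) -> list[list[int]]:
--     # one stable sort of all row indices by (date, market), then split into date runs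
--     order = sorted(range(len(rows)), key=lambda i: (rows[i]["date_utc"], rows[i]["market"]))
--     out: list[list[int]] = []
--     cur: list[int] = []
--     prev = None
--     for i in order:
--         d = rows[i]["date_utc"]
--         if cur and d != prev:
--             out.append(cur)
--             cur = []
--         cur.append(i)
--         prev = d
--     if cur:
--         out.append(cur)
--     return out
-- ===== Notes on version B (the rewrite author's own statement) =====
-- stated objective: alternative
-- what changed: A buckets row indices into a defaultdict keyed by date and then sorts the keys and each bucket by market; B does one stable sort of all indices by the composite key (date_utc, market) and splits the sorted sequence into consecutive date runs in a single pass.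
import Mathlib
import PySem

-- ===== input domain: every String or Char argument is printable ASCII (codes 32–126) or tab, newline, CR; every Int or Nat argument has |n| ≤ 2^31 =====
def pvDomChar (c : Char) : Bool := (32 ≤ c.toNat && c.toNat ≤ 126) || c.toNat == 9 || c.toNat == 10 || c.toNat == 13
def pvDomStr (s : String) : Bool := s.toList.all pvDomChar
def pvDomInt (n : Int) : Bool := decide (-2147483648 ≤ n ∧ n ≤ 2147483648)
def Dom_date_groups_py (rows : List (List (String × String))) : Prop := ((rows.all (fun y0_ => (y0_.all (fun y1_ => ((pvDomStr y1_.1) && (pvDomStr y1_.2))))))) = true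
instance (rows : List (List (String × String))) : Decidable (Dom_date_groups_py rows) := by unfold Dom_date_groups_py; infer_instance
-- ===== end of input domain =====

-- B replaces A's dict bucketing + per-bucket sort by ONE stable sort of all row indices by the
-- composite key (date_utc, market) followed by a single run-splitting pass on date_utc.

-- shared helpers: row["k"] (first-match dict lookup; Pre_ guarantees the key is present, so the
-- "" default is never reached on admitted inputs) and the two sort keys rows[i]["date_utc"] / rows[i]["market"]
def pvRowGet (row : List (String × String)) (k : String) : String :=
  ((PySem.Dict.mk row).get? k).getD ""

def pvKey1 (rows : List (List (String × String))) (i : Int) : String :=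
  pvRowGet (PySem.List.pyGetD rows i []) "date_utc"

def pvKey2 (rows : List (List (String × String))) (i : Int) : String :=
  pvRowGet (PySem.List.pyGetD rows i []) "market"

-- ===== PORT A =====
def date_groups_py (rows : List (List (String × String))) : List (List Int) :=
  let grouped : PySem.Dict String (List Int) :=
    (PySem.List.enumerate rows).foldl
      (fun d p => d.modify (pvRowGet p.2 "date_utc") [] (fun l => l ++ [p.1]))
      PySem.Dict.empty
  -- sorted(grouped.items()): dict keys are distinct, so Python's tuple comparison never reaches
  -- the list values — ordering the pairs by their key alone is exact here
  (PySem.List.sorted grouped.items (fun p => p.1)).map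
    (fun p => PySem.List.sorted p.2 (fun idx => pvKey2 rows idx))

-- ===== PORT B =====
-- loop body of B's run-splitting pass (state: finished groups, current group, previous date)
def pvSplitStep (rows : List (List (String × String)))
    (st : List (List Int) × List Int × Option String) (i : Int) :
    List (List Int) × List Int × Option String :=
  let d := pvKey1 rows i
  if st.2.1 ≠ [] ∧ some d ≠ st.2.2 then (st.1 ++ [st.2.1], [i], some d)
  else (st.1, st.2.1 ++ [i], some d)

def date_groups_py_alt (rows : List (List (String × String))) : List (List Int) :=
  let order := PySem.List.sorted2 (PySem.List.pyRange 0 (rows.length : Int) 1)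
    (fun i => pvKey1 rows i) (fun i => pvKey2 rows i)
  let st := order.foldl (pvSplitStep rows) ([], [], none)
  if st.2.1 ≠ [] then st.1 ++ [st.2.1] else st.1

-- ===== PRECONDITION & SPEC =====
-- Pre_ excludes exactly the inputs where Python A raises KeyError: a row missing "date_utc" or "market".
def Pre_date_groups_py (rows : List (List (String × String))) : Prop :=
  ∀ row ∈ rows, ((PySem.Dict.mk row).get? "date_utc").isSome = true ∧
    ((PySem.Dict.mk row).get? "market").isSome = true

instance (rows : List (List (String × String))) : Decidable (Pre_date_groups_py rows) := by
  unfold Pre_date_groups_py; infer_instance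

def pvWitness_date_groups_py : (List (List (String × String))) :=
  [[("date_utc", "2024-01-01"), ("market", "KRW-BTC")],
   [("date_utc", "2024-01-01"), ("market", "KRW-ETH")]]

def Spec_date_groups_py (rows : List (List (String × String))) (out : List (List Int)) : Prop :=
  out = date_groups_py_alt rows
instance (rows : List (List (String × String))) (out : List (List Int)) : Decidable (Spec_date_groups_py rows out) := by unfold Spec_date_groups_py; infer_instance

-- ===== CLAIM (what is proved, stated in full; the proofs are below) =====
def Claim_equal_date_groups_py : Prop := ∀ (rows : List (List (String × String))), Dom_date_groups_py rows → Pre_date_groups_py rows → Spec_date_groups_py rows (date_groups_py rows)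

-- ===== LEMMAS AND PROOFS =====

-- proof-side canonical form: the distinct dates in increasing order; per date the indices of
-- that date (in input order) sorted stably by market
def pvIdxs (rows : List (List (String × String))) : List Int :=
  PySem.List.pyRange 0 (rows.length : Int) 1

def pvGStep (rows : List (List (String × String))) :
    PySem.Dict String (List Int) → Int → PySem.Dict String (List Int) :=
  fun d i => d.modify (pvKey1 rows i) [] (fun l => l ++ [i])

def pvDates (rows : List (List (String × String))) : List String :=
  PySem.List.sorted (PySem.Set.ofList ((pvIdxs rows).map (pvKey1 rows))) (fun v => v)

def pvGrp (rows : List (List (String × String))) (v : String) : List Int :=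
  (pvIdxs rows).filter (fun i => pvKey1 rows i == v)

def pvCanon (rows : List (List (String × String))) : List (List Int) :=
  (pvDates rows).map (fun v => PySem.List.sorted (pvGrp rows v) (fun i => pvKey2 rows i))

lemma pv_insertBy_congr {α : Type} (b b' : α → α → Bool) (x : α) (ys : List α)
    (h : ∀ y ∈ ys, b x y = b' x y) :
    PySem.List.insertBy b x ys = PySem.List.insertBy b' x ys := by
  induction ys with
  | nil => rfl
  | cons y ys ih =>
    simp only [PySem.List.insertBy, h y (by simp)]
    split
    · rfl
    · rw [ih fun z hz => h z (by simp [hz])]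

lemma pv_sorted_snoc {α κ : Type} [LT κ] [DecidableLT κ] (xs : List α) (x : α) (key : α → κ) :
    PySem.List.sorted (xs ++ [x]) key =
      PySem.List.insertBy (fun a b => decide (key a < key b)) x (PySem.List.sorted xs key) := by
  rw [PySem.List.sorted_eq_foldl_insertBy, PySem.List.sorted_eq_foldl_insertBy, List.foldl_append]
  rfl

lemma pv_stable {κ : Type} [LinearOrder κ] (K : Int → κ) (xs : List Int)
    (h : xs.Pairwise (· < ·)) :
    PySem.List.sorted xs K = PySem.List.sorted xs (fun i => toLex (K i, i)) := by
  induction xs using List.reverseRecOn with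
  | nil => rfl
  | append_singleton xs x ih =>
    rw [List.pairwise_append] at h
    rw [pv_sorted_snoc, pv_sorted_snoc, ih h.1]
    apply pv_insertBy_congr
    intro y hy
    have hyx : y < x := h.2.2 y ((PySem.List.mem_sorted _ _ _ _).mp hy) x (by simp)
    have : (toLex (K x, x) < toLex (K y, y)) ↔ K x < K y := by
      rw [Prod.Lex.lt_iff]
      simp only [ofLex_toLex]
      constructor
      · rintro (h1 | ⟨h1, h2⟩)
        · exact h1
        · exact absurd h2 (by simp; omega)
      · exact Or.inl
    simp [this]

lemma pv_sorted2_lex {α κ₁ κ₂ : Type} [LinearOrder κ₁] [LinearOrder κ₂]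
    (xs : List α) (kA : α → κ₁) (kB : α → κ₂) :
    PySem.List.sorted2 xs kA kB = PySem.List.sorted xs (fun x => toLex (kA x, kB x)) := by
  rw [PySem.List.sorted_eq_foldl_insertBy]
  simp only [PySem.List.sorted2]
  have hb : (fun a b => decide (kA a < kA b) || (!decide (kA b < kA a) && decide (kB a < kB b)))
      = (fun a b => decide (toLex (kA a, kB a) < toLex (kA b, kB b))) := by
    funext a b
    rcases lt_trichotomy (kA a) (kA b) with h1 | h1 | h1
    · simp [h1, Prod.Lex.lt_iff, le_of_lt h1]
    · simp [h1, Prod.Lex.lt_iff, lt_irrefl]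
    · simp [h1, not_lt_of_gt h1, Prod.Lex.lt_iff, ne_of_gt h1, not_lt_of_gt h1]
  simp only [Bool.false_eq_true, if_false, hb]

lemma pv_enum {α : Type} (xs : List α) (s : Int) (d : α) :
    PySem.List.enumerate xs s = (List.range xs.length).map (fun k : Nat => (s + (k : Int), xs.getD k d)) := by
  induction xs generalizing s with
  | nil => rfl
  | cons x t ih =>
    simp only [PySem.List.enumerate, List.length_cons, List.range_succ_eq_map, List.map_cons,
      List.map_map, ih (s+1)]
    refine congrArg₂ _ (by simp) ?_
    apply List.map_congr_left
    intro k _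
    simp only [Function.comp_apply, List.getD_cons_succ]
    congr 1
    push_cast; ring

lemma pv_enum_idxs (rows : List (List (String × String))) :
    PySem.List.enumerate rows = (pvIdxs rows).map (fun i => (i, PySem.List.pyGetD rows i [])) := by
  rw [pv_enum rows 0 [], pvIdxs, PySem.List.pyRange_zero_natCast, List.map_map]
  apply List.map_congr_left
  intro k _
  simp [PySem.List.pyGetD_natCast]

lemma pv_idxs_lt (rows : List (List (String × String))) : (pvIdxs rows).Pairwise (· < ·) := by
  rw [pvIdxs, PySem.List.pyRange_zero_natCast]
  exact List.pairwise_map.mpr (List.pairwise_lt_range.imp (by exact_mod_cast fun h => h))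

lemma pv_get_map (D : List String) (f : String → List Int) (x : String) :
    (PySem.Dict.mk (D.map (fun v => (v, f v)))).get? x = if x ∈ D then some (f x) else none := by
  induction D with
  | nil => rfl
  | cons v D ih =>
    by_cases hv : v = x
    · subst hv; simp [PySem.Dict.get?, List.find?_cons]
    · have hb : (v == x) = false := by simpa using hv
      simp only [List.map_cons, PySem.Dict.get?, List.find?_cons, hb] at ih ⊢
      rw [ih]
      have : (x = v ∨ x ∈ D) ↔ x ∈ D :=
        ⟨fun h => h.resolve_left (fun h1 => hv h1.symm), Or.inr⟩
      simp [this]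

lemma pv_contains_map (D : List String) (f : String → List Int) (x : String) :
    (PySem.Dict.mk (D.map (fun v => (v, f v)))).contains x = decide (x ∈ D) := by
  by_cases hx : x ∈ D
  · simp [PySem.Dict.contains, List.any_map, Function.comp, List.any_eq_true, hx]
  · simp only [PySem.Dict.contains, List.any_map, Function.comp, hx, decide_false]
    rw [List.any_eq_false]
    intro v hv
    simp only [Function.comp_apply, beq_iff_eq]
    exact fun e => hx (e ▸ hv)

lemma pv_group (rows : List (List (String × String))) (l : List Int) :
    (l.foldl (pvGStep rows) PySem.Dict.empty).items
      = (PySem.Set.ofList (l.map (pvKey1 rows))).map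
          (fun v => (v, l.filter (fun i => pvKey1 rows i == v))) := by
  induction l using List.reverseRecOn with
  | nil => rfl
  | append_singleton l i ih =>
    have hG : l.foldl (pvGStep rows) PySem.Dict.empty
        = PySem.Dict.mk ((PySem.Set.ofList (l.map (pvKey1 rows))).map
            (fun v => (v, l.filter (fun j => pvKey1 rows j == v)))) := by
      apply PySem.Dict.ext; exact ih
    set v0 := pvKey1 rows i with hv0
    set D : List String := PySem.Set.ofList (l.map (pvKey1 rows)) with hD
    have hRHS : PySem.Set.ofList ((l ++ [i]).map (pvKey1 rows)) = PySem.Set.add D v0 := by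
      rw [List.map_append, PySem.Set.ofList_eq_foldl, List.foldl_append,
        ← PySem.Set.ofList_eq_foldl]
      rfl
    rw [List.foldl_append, hG]
    simp only [List.foldl_cons, List.foldl_nil, hRHS]
    show (PySem.Dict.modify _ v0 [] (fun t => t ++ [i])).items = _
    simp only [PySem.Dict.modify, PySem.Dict.getD, pv_get_map]
    by_cases hv : v0 ∈ D
    · have hadd : PySem.Set.add D v0 = D := by
        show (if PySem.Set.contains D v0 = true then D else D ++ [v0]) = D
        have : PySem.Set.contains D v0 = true := by
          simp only [PySem.Set.contains]
          exact List.elem_eq_true_of_mem hv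
        rw [this]
        simp
      rw [hadd]
      simp only [PySem.Dict.insert, pv_contains_map, hv, decide_true, if_true, List.map_map,
        if_pos]
      apply List.map_congr_left
      intro v hvD
      by_cases hvv : v = v0
      · subst hvv
        simp [List.filter_append, hv0]
      · have hb1 : (v == v0) = false := by simpa using hvv
        simp only [Function.comp_apply, hb1, Bool.false_eq_true, if_false]
        have hb2 : (pvKey1 rows i == v) = false := by
          rw [← hv0]
          simpa using fun e => hvv e.symm
        simp [List.filter_append, hb2]
    · have hadd : PySem.Set.add D v0 = D ++ [v0] := by
        show (if PySem.Set.contains D v0 = true then D else D ++ [v0]) = D ++ [v0]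
        have : PySem.Set.contains D v0 = false := by
          simp only [PySem.Set.contains]
          simp only [List.contains_eq_mem, decide_eq_false_iff_not]
          exact hv
        rw [this]
        simp
      rw [hadd]
      simp only [PySem.Dict.insert, pv_contains_map, hv, decide_false, Bool.false_eq_true,
        if_false, List.map_append, List.map_cons, List.map_nil]
      congr 1
      · apply List.map_congr_left
        intro v hvD
        have hb2 : (pvKey1 rows i == v) = false := by
          have hne : v ≠ v0 := fun e => hv (e ▸ hvD)
          rw [← hv0]
          simpa using fun e => hne e.symm
        simp [List.filter_append, hb2]
      · have hfl : l.filter (fun j => pvKey1 rows j == v0) = [] := by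
          rw [List.filter_eq_nil_iff]
          intro j hj hbe
          apply hv
          rw [hD, PySem.Set.mem_ofList]
          exact List.mem_map.mpr ⟨j, hj, by simpa using hbe⟩
        simp only [List.filter_append, hfl, List.nil_append, List.filter_cons, List.filter_nil]
        rw [← hv0]
        simp

lemma pv_part (rows : List (List (String × String))) (D : List String) (xs : List Int)
    (hD : D.Nodup) (h : ∀ i ∈ xs, pvKey1 rows i ∈ D) :
    ((D.map (fun v => xs.filter (fun i => pvKey1 rows i == v))).flatten).Perm xs := by
  induction D generalizing xs with
  | nil =>
    have : xs = [] := List.eq_nil_iff_forall_not_mem.mpr (fun i hi => by simpa using h i hi)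
    simp [this]
  | cons v D ih =>
    simp only [List.map_cons, List.flatten_cons]
    have hvD : v ∉ D := (List.nodup_cons.mp hD).1
    have hmap : D.map (fun v' => xs.filter (fun i => pvKey1 rows i == v'))
        = D.map (fun v' => (xs.filter (fun i => !(pvKey1 rows i == v))).filter
            (fun i => pvKey1 rows i == v')) := by
      apply List.map_congr_left
      intro v' hv'
      have hne : v' ≠ v := fun e => hvD (e ▸ hv')
      rw [List.filter_filter]
      apply List.filter_congr
      intro i _
      by_cases hk : pvKey1 rows i = v'
      · simp [hk, hne]
      · simp [hk]
    rw [hmap]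
    have hperm := ih (xs.filter (fun i => !(pvKey1 rows i == v))) (List.nodup_cons.mp hD).2
      (by
        intro i hi
        rcases List.mem_filter.mp hi with ⟨hixs, hnv⟩
        rcases h i hixs with hmem
        simp only [List.mem_cons] at hmem
        rcases hmem with h1 | h2
        · exfalso; revert hnv; simp [h1]
        · exact h2)
    exact (hperm.append_left _).trans (List.filter_append_perm _ xs)

lemma pv_flatten_map_perm {α β : Type} (D : List α) (f g : α → List β)
    (h : ∀ v, (f v).Perm (g v)) : ((D.map f).flatten).Perm ((D.map g).flatten) := by
  induction D with
  | nil => rfl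
  | cons v D ih => simpa using (h v).append ih

lemma pv_dates_lt (rows : List (List (String × String))) : (pvDates rows).Pairwise (· < ·) :=
  PySem.List.sorted_ofList_pairwise_lt _

lemma pv_mem_grp (rows : List (List (String × String))) (v : String) (i : Int)
    (h : i ∈ pvGrp rows v) : pvKey1 rows i = v := by
  simpa using (List.mem_filter.mp h).2

lemma pv_grp_ne_nil (rows : List (List (String × String))) (v : String)
    (h : v ∈ pvDates rows) : pvGrp rows v ≠ [] := by
  rw [pvDates, PySem.List.mem_sorted, PySem.Set.mem_ofList] at h
  rcases List.mem_map.mp h with ⟨i, hi, hk⟩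
  intro hnil
  rw [pvGrp, List.filter_eq_nil_iff] at hnil
  exact hnil i hi (by simp [hk])

lemma pv_items_sorted (rows : List (List (String × String))) :
    PySem.List.sorted
        ((PySem.Set.ofList ((pvIdxs rows).map (pvKey1 rows))).map
          (fun v => (v, (pvIdxs rows).filter (fun i => pvKey1 rows i == v))))
        (fun p => p.1)
      = (pvDates rows).map (fun v => (v, pvGrp rows v)) := by
  apply PySem.List.sorted_eq_of_perm_of_pairwise_lt
  · exact (PySem.List.sorted_perm _ _ _).map _
  · rw [List.pairwise_map]
    exact PySem.List.sorted_ofList_pairwise_lt _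

lemma pv_a_canon (rows : List (List (String × String))) : date_groups_py rows = pvCanon rows := by
  show (PySem.List.sorted
      ((PySem.List.enumerate rows).foldl
        (fun d p => d.modify (pvRowGet p.2 "date_utc") [] (fun l => l ++ [p.1]))
        PySem.Dict.empty).items (fun p => p.1)).map
      (fun p => PySem.List.sorted p.2 (fun idx => pvKey2 rows idx)) = pvCanon rows
  rw [pv_enum_idxs, List.foldl_map]
  have hbody : (fun (d : PySem.Dict String (List Int)) (i : Int) =>
      d.modify (pvRowGet (PySem.List.pyGetD rows i []) "date_utc") [] (fun l => l ++ [i]))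
      = pvGStep rows := rfl
  rw [hbody, pv_group, pv_items_sorted, List.map_map]
  rfl

lemma pv_order (rows : List (List (String × String))) :
    PySem.List.sorted2 (pvIdxs rows) (fun i => pvKey1 rows i) (fun i => pvKey2 rows i)
      = ((pvDates rows).map
          (fun v => PySem.List.sorted (pvGrp rows v) (fun i => toLex (pvKey2 rows i, i)))).flatten := by
  rw [pv_sorted2_lex, pv_stable _ _ (pv_idxs_lt rows)]
  apply PySem.List.sorted_eq_of_perm_of_pairwise_lt
  · exact (pv_flatten_map_perm _ _ _ (fun v => PySem.List.sorted_perm _ _ _)).trans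
      ((((PySem.List.sorted_perm _ _ _).map _).flatten).trans
        (pv_part rows _ (pvIdxs rows) (PySem.Set.nodup_ofList _)
          (fun i hi => (PySem.Set.mem_ofList _ _).mpr (List.mem_map.mpr ⟨i, hi, rfl⟩))))
  · rw [List.pairwise_flatten]
    constructor
    · intro b hb
      rcases List.mem_map.mp hb with ⟨v, hv, rfl⟩
      have h1 : List.Pairwise (fun x y => (fun i => toLex (pvKey2 rows i, i)) x
          ≤ (fun i => toLex (pvKey2 rows i, i)) y)
          (PySem.List.sorted (pvGrp rows v) (fun i => toLex (pvKey2 rows i, i))) :=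
        PySem.List.sorted_pairwise _ _
      have hnd : (PySem.List.sorted (pvGrp rows v) (fun i => toLex (pvKey2 rows i, i))).Nodup := by
        rw [(PySem.List.sorted_perm _ _ _).nodup_iff]
        exact ((pv_idxs_lt rows).filter _).imp (fun h => ne_of_lt h)
      refine (h1.and hnd).imp_of_mem ?_
      intro x y hx hy ⟨hle, hne⟩
      have hkx : pvKey1 rows x = v := pv_mem_grp rows v x ((PySem.List.mem_sorted _ _ _ _).mp hx)
      have hky : pvKey1 rows y = v := pv_mem_grp rows v y ((PySem.List.mem_sorted _ _ _ _).mp hy)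
      simp only at hle
      rw [Prod.Lex.le_iff] at hle
      simp only [ofLex_toLex] at hle
      rw [Prod.Lex.lt_iff]
      simp only [ofLex_toLex]
      rcases hle with h2 | ⟨h2, h3⟩
      · left
        rw [Prod.Lex.lt_iff]
        simp only [ofLex_toLex]
        right
        exact ⟨by rw [hkx, hky], h2⟩
      · right
        constructor
        · rw [h2]
          congr 1
          exact Prod.ext (by rw [hkx, hky]) rfl
        · exact lt_of_le_of_ne h3 hne
    · rw [List.pairwise_map]
      refine (pv_dates_lt rows).imp ?_
      intro v1 v2 hlt x hx y hy
      have hkx : pvKey1 rows x = v1 := pv_mem_grp rows v1 x ((PySem.List.mem_sorted _ _ _ _).mp hx)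
      have hky : pvKey1 rows y = v2 := pv_mem_grp rows v2 y ((PySem.List.mem_sorted _ _ _ _).mp hy)
      rw [Prod.Lex.lt_iff]
      simp only [ofLex_toLex]
      left
      rw [Prod.Lex.lt_iff]
      simp only [ofLex_toLex]
      left
      rw [hkx, hky]
      exact hlt

lemma pv_split_inner (rows : List (List (String × String))) (b : List Int) (v : String)
    (h : ∀ i ∈ b, pvKey1 rows i = v) :
    ∀ (out : List (List Int)) (cur : List Int),
      b.foldl (pvSplitStep rows) (out, cur, some v) = (out, cur ++ b, some v) := by
  induction b with
  | nil => intro out cur; simp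
  | cons i b ih =>
    intro out cur
    have hi : pvKey1 rows i = v := h i (by simp)
    have hstep : pvSplitStep rows (out, cur, some v) i = (out, cur ++ [i], some v) := by
      simp [pvSplitStep, hi]
    rw [List.foldl_cons, hstep, ih (fun j hj => h j (by simp [hj]))]
    simp

lemma pv_split_aux (rows : List (List (String × String))) (bf : String → List Int) :
    ∀ (ds : List String), (∀ v ∈ ds, bf v ≠ [] ∧ ∀ i ∈ bf v, pvKey1 rows i = v) →
    ∀ (out : List (List Int)) (cur : List Int) (prev : String),
      cur ≠ [] → (prev :: ds).Pairwise (· ≠ ·) →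
      (let st := ((ds.map bf).flatten).foldl (pvSplitStep rows) (out, cur, some prev)
       if st.2.1 ≠ [] then st.1 ++ [st.2.1] else st.1) = out ++ [cur] ++ ds.map bf := by
  intro ds
  induction ds with
  | nil => intro _ out cur prev hcur _; simp [hcur]
  | cons v ds ih =>
    intro hbf' out cur prev hcur hpw
    have hbf : ∀ v' ∈ v :: ds, bf v' ≠ [] ∧ ∀ i ∈ bf v', pvKey1 rows i = v' := hbf'
    have hpv : prev ≠ v := (List.pairwise_cons.mp hpw).1 v (by simp)
    rcases hb : bf v with _ | ⟨i0, b'⟩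
    · exact absurd hb (hbf v (by simp)).1
    have hk0 : pvKey1 rows i0 = v := (hbf v (by simp)).2 i0 (by rw [hb]; simp)
    have hstep : pvSplitStep rows (out, cur, some prev) i0 = (out ++ [cur], [i0], some v) := by
      simp only [pvSplitStep, hk0]
      rw [if_pos ⟨hcur, by simpa using fun e : v = prev => hpv e.symm⟩]
    simp only [List.map_cons, List.flatten_cons, List.foldl_append, hb, List.foldl_cons, hstep]
    rw [pv_split_inner rows b' v (fun j hj => (hbf v (by simp)).2 j (by rw [hb]; simp [hj]))]
    have := ih (fun v' hv' => hbf v' (by simp [hv'])) (out ++ [cur]) (bf v) v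
      (hbf v (by simp)).1 (List.pairwise_cons.mp hpw).2
    simp only [hb] at this
    rw [(by simp [hb] : ([i0] ++ b' : List Int) = bf v)]
    rw [hb, this]
    simp

lemma pv_b_canon (rows : List (List (String × String))) :
    date_groups_py_alt rows = pvCanon rows := by
  unfold date_groups_py_alt
  rw [show PySem.List.pyRange 0 (rows.length : Int) 1 = pvIdxs rows from rfl, pv_order rows]
  have hbf : ∀ v, v ∈ pvDates rows →
      PySem.List.sorted (pvGrp rows v) (fun i => toLex (pvKey2 rows i, i)) ≠ [] ∧
      ∀ i ∈ PySem.List.sorted (pvGrp rows v) (fun i => toLex (pvKey2 rows i, i)),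
        pvKey1 rows i = v := by
    intro v hv
    constructor
    · intro hnil
      exact pv_grp_ne_nil rows v hv ((PySem.List.sorted_eq_nil_iff _ _ _).mp hnil)
    · intro i hi
      exact pv_mem_grp rows v i ((PySem.List.mem_sorted _ _ _ _).mp hi)
  have hcanon : pvCanon rows = (pvDates rows).map
      (fun v => PySem.List.sorted (pvGrp rows v) (fun i => toLex (pvKey2 rows i, i))) := by
    apply List.map_congr_left
    intro v _
    exact pv_stable (pvKey2 rows) (pvGrp rows v) ((pv_idxs_lt rows).filter _)
  rcases hd : pvDates rows with _ | ⟨v, ds⟩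
  · simp [hcanon, hd]
  · have hpw : (v :: ds).Pairwise (· ≠ ·) := by
      have := (pv_dates_lt rows).imp (fun h => ne_of_lt h)
      rwa [hd] at this
    have hbf2 : ∀ v' ∈ v :: ds,
        PySem.List.sorted (pvGrp rows v') (fun i => toLex (pvKey2 rows i, i)) ≠ [] ∧
        ∀ i ∈ PySem.List.sorted (pvGrp rows v') (fun i => toLex (pvKey2 rows i, i)),
          pvKey1 rows i = v' := fun v' hv' => hbf v' (by rw [hd]; exact hv')
    rcases hb : PySem.List.sorted (pvGrp rows v) (fun i => toLex (pvKey2 rows i, i))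
      with _ | ⟨i0, b'⟩
    · exact absurd hb (hbf2 v (by simp)).1
    have hk0 : pvKey1 rows i0 = v := (hbf2 v (by simp)).2 i0 (by rw [hb]; simp)
    have hstep : pvSplitStep rows ([], [], none) i0 = ([], [i0], some v) := by
      simp [pvSplitStep, hk0]
    simp only [hd, List.map_cons, List.flatten_cons, List.foldl_append, hb, List.foldl_cons,
      hstep]
    rw [pv_split_inner rows b' v (fun j hj => (hbf2 v (by simp)).2 j (by rw [hb]; simp [hj]))]
    rw [(by simp [hb] : ([i0] ++ b' : List Int)
      = PySem.List.sorted (pvGrp rows v) (fun i => toLex (pvKey2 rows i, i)))]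
    have := pv_split_aux rows
      (fun v => PySem.List.sorted (pvGrp rows v) (fun i => toLex (pvKey2 rows i, i))) ds
      (fun v' hv' => hbf2 v' (by simp [hv'])) [] 
      (PySem.List.sorted (pvGrp rows v) (fun i => toLex (pvKey2 rows i, i))) v
      (hbf2 v (by simp)).1 hpw
    simp only at this
    rw [this, hcanon, hd]
    simp

-- ===== VERDICT (by name: the statement is the Claim_ definition above) =====
theorem date_groups_py_spec : Claim_equal_date_groups_py := by
  intro rows _ _
  show date_groups_py rows = date_groups_py_alt rows
  rw [pv_a_canon, pv_b_canon]
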